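-- pv_equiv track=rewrite | github.com/HarshOza36/LeetCode_Problems | String/P1332 - removePalindromicSubsequence.py | removePalindromeSub
-- ===== SOURCE A (Python) =====
-- def removePalindromeSub(s):
--     """
--     :type s: str
--     :rtype: int
--     """
--     if not s: return 0
--     l, r = 0, len(s) - 1
--     while l < r:
--         if s[l] != s[r]:
--             break
--         l, r = l + 1, r - 1
--     else: return 1
--     return 2
-- ===== SOURCE B (Python) =====
-- def removePalindromeSub(s):
--     if not s:
--         return 0
--     return 1 if s == s[::-1] else 2
-- ===== Notes on version B (the rewrite author's own statement) =====
-- stated objective: idiomatic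
-- what changed: Replaces the manual two-pointer inward scan (with a while/else) by building the reversed string once and doing a single whole-string equality comparison.
import Mathlib
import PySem

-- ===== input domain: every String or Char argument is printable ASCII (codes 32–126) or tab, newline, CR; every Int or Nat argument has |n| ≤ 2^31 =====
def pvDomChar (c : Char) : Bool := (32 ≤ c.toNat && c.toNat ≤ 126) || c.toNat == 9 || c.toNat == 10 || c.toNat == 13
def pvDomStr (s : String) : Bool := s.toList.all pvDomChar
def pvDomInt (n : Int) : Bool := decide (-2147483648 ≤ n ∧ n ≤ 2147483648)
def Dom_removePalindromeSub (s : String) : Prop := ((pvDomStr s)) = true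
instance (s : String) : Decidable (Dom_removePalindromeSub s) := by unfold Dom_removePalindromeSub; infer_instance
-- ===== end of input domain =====

-- B replaces A's manual two-pointer inward scan by reversing the string once and one equality comparison.

-- ===== PORT A =====
-- the `while l < r … else: return 1` loop of A, step for step
def removePalindromeSubLoop (cs : List Char) (l r : Nat) : Int :=
  if l < r then
    if cs[l]? ≠ cs[r]? then 2
    else removePalindromeSubLoop cs (l + 1) (r - 1)
  else 1
termination_by r - l
decreasing_by omega

def removePalindromeSub (s : String) : Int :=
  if s = "" then 0
  else removePalindromeSubLoop s.toList 0 (s.toList.length - 1)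

-- ===== PORT B =====
def removePalindromeSub_alt (s : String) : Int :=
  if s = "" then 0
  else if PySem.Str.slice? s none none (-1) = some s then 1 else 2

-- ===== PRECONDITION & SPEC =====
def Spec_removePalindromeSub (s : String) (out : Int) : Prop := out = removePalindromeSub_alt s
instance (s : String) (out : Int) : Decidable (Spec_removePalindromeSub s out) := by unfold Spec_removePalindromeSub; infer_instance

-- ===== CLAIM (what is proved, stated in full; the proofs are below) =====
def Claim_equal_removePalindromeSub : Prop := ∀ (s : String), Dom_removePalindromeSub s → Spec_removePalindromeSub s (removePalindromeSub s)

-- ===== LEMMAS AND PROOFS =====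

lemma loop_one_or_two (cs : List Char) : ∀ d l r, r - l = d →
    removePalindromeSubLoop cs l r = 1 ∨ removePalindromeSubLoop cs l r = 2 := by
  intro d
  induction d using Nat.strong_induction_on with
  | _ d ih =>
    intro l r hd
    rw [removePalindromeSubLoop]
    split_ifs with h1 h2
    · right; rfl
    · exact ih ((r - 1) - (l + 1)) (by omega) (l + 1) (r - 1) rfl
    · left; rfl

lemma loop_eq_one_iff (cs : List Char) : ∀ d l r, r - l = d →
    (removePalindromeSubLoop cs l r = 1 ↔
      ∀ i, l ≤ i → 2 * i < l + r → cs[i]? = cs[l + r - i]?) := by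
  intro d
  induction d using Nat.strong_induction_on with
  | _ d ih =>
    intro l r hd
    rw [removePalindromeSubLoop]
    split_ifs with h1 h2
    · simp only [show (2 : Int) ≠ 1 by decide, false_iff]
      intro H
      exact h2 (by have := H l le_rfl (by omega); simpa [show l + r - l = r by omega] using this)
    · rw [ih ((r - 1) - (l + 1)) (by omega) (l + 1) (r - 1) rfl]
      constructor
      · intro H i hi h2i
        rcases Nat.eq_or_lt_of_le hi with rfl | hlt
        · have : cs[l]? = cs[r]? := not_not.mp h2
          simpa [show l + r - l = r by omega] using this
        · have := H i (by omega) (by omega)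
          simpa [show (l + 1) + (r - 1) = l + r by omega] using this
      · intro H i hi h2i
        have := H i (by omega) (by omega)
        simpa [show (l + 1) + (r - 1) = l + r by omega] using this
    · -- when ¬ l < r the bound 2*i < l+r with l ≤ i is contradictory
      simp only [true_iff]
      intro i hi h2i
      omega

lemma rev_eq_iff (cs : List Char) :
    cs.reverse = cs ↔ ∀ i, 2 * i < cs.length - 1 → cs[i]? = cs[cs.length - 1 - i]? := by
  constructor
  · intro h i hi
    have hil : i < cs.length := by omega
    calc cs[i]? = cs.reverse[i]? := by rw [h]
      _ = cs[cs.length - 1 - i]? := by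
            rw [List.getElem?_reverse hil]
  · intro H
    apply List.ext_getElem?
    intro i
    by_cases hil : i < cs.length
    · rw [List.getElem?_reverse hil]
      rcases Nat.lt_trichotomy (2 * i) (cs.length - 1) with h | h | h
      · exact (H i h).symm
      · have : cs.length - 1 - i = i := by omega
        rw [this]
      · have hj : 2 * (cs.length - 1 - i) < cs.length - 1 := by omega
        have := H (cs.length - 1 - i) hj
        rw [show cs.length - 1 - (cs.length - 1 - i) = i by omega] at this
        exact this
    · rw [List.getElem?_eq_none (by simpa using Nat.le_of_not_lt hil),
          List.getElem?_eq_none (by omega)]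

-- ===== VERDICT (by name: the statement is the Claim_ definition above) =====
theorem removePalindromeSub_spec : Claim_equal_removePalindromeSub := by
  intro s _
  show removePalindromeSub s = removePalindromeSub_alt s
  unfold removePalindromeSub removePalindromeSub_alt
  by_cases hs : s = ""
  · simp [hs]
  · simp only [hs, if_false]
    rw [PySem.Str.slice?_none_none_neg_one]
    set cs := s.toList with hcs
    have hkey : removePalindromeSubLoop cs 0 (cs.length - 1) = 1 ↔ cs.reverse = cs := by
      rw [loop_eq_one_iff cs (cs.length - 1 - 0) 0 (cs.length - 1) rfl, rev_eq_iff]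
      constructor
      · intro H i hi; simpa using H i (Nat.zero_le _) (by omega)
      · intro H i _ hi; simpa using H i (by omega)
    by_cases hp : cs.reverse = cs
    · have h1 : removePalindromeSubLoop cs 0 (cs.length - 1) = 1 := hkey.mpr hp
      have h2 : String.ofList cs.reverse = s := by
        rw [hp, hcs]
        exact String.ofList_toList
      simp [h1, h2]
    · have h2 : removePalindromeSubLoop cs 0 (cs.length - 1) = 2 := by
        rcases loop_one_or_two cs (cs.length - 1 - 0) 0 (cs.length - 1) rfl with h | h
        · exact absurd (hkey.mp h) hp
        · exact h
      have h3 : ¬ (String.ofList cs.reverse = s) := by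
        intro he
        apply hp
        have := congrArg String.toList he
        simpa [hcs] using this
      simp [h2, h3]
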